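-- pv_equiv track=rewrite | github.com/pzac/advent-of-code | 2024-python/day-02/part-2.py | can_be_good
-- ===== SOURCE A (Python) =====
-- def all_increasing(items):
--     return sorted(items) == items
--
-- def all_decreasing(items):
--     return sorted(items) == items[::-1]
--
-- def valid_steps(items):
--     curr = items[0]
--     for t in items[1:]:
--         val = abs(t - curr)
--         if val < 1 or val > 3:
--             return False
--         curr = t
--     return True
--
-- def is_good(items):
--     if not valid_steps(items):
--         return False
--     if not (all_increasing(items) or all_decreasing(items)):
--         return False
--     return True
--
-- def can_be_good(items):
--     if is_good(items):
--         return True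
--     for i in range(len(items)):
--         copy = items.copy()
--         copy.pop(i)
--         if is_good(copy):
--             return True
--     return False
-- ===== SOURCE B (Python) =====
-- def can_be_good(items):
--     # Single linear pass per direction with a one-removal dampener:
--     # walk to the first bad adjacent pair and try dropping either of its two
--     # elements (dropping anything else leaves the bad pair adjacent).
--     def step_ok(a, b, up):
--         d = b - a if up else a - b
--         return 1 <= d <= 3
--
--     def ok(prev, rest, up):
--         for t in rest:
--             if not step_ok(prev, t, up):
--                 return False
--             prev = t
--         return True
--
--     def damp(up):
--         if not items:
--             return True
--         prev, rest = items[0], items[1:]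
--         pp = None  # element before prev, if any
--         for k in range(len(rest)):
--             t = rest[k]
--             if step_ok(prev, t, up):
--                 pp = prev
--                 prev = t
--                 continue
--             tail = rest[k + 1:]
--             drop_right = ok(prev, tail, up)
--             if pp is None:
--                 drop_left = ok(t, tail, up)
--             else:
--                 drop_left = ok(pp, [t] + tail, up)
--             return drop_left or drop_right
--         return True
--
--     return damp(True) or damp(False)
-- ===== Notes on version B (the rewrite author's own statement) =====
-- stated objective: faster
-- what changed: Replaced the O(n^2 log n) try-every-removal loop (each trial re-sorting the list twice) by one linear monotonic pass per direction that walks to the first bad adjacent pair and only tries dropping one of its two elements.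
-- outside the precondition, e.g. on can_be_good([]): A raises IndexError, B returns True
import Mathlib
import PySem

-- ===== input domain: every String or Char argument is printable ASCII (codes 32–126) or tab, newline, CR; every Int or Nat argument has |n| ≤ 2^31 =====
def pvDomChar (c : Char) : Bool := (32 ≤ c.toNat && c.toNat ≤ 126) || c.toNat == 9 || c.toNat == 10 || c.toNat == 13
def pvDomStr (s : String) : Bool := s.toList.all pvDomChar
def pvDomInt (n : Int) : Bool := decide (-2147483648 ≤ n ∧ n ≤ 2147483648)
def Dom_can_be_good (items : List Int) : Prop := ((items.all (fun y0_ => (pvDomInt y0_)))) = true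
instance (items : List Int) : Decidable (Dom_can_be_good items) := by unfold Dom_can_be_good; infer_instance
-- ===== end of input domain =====

-- B replaces A's try-every-removal loop (re-sorting on each trial) by one linear pass per
-- direction that only tries dropping an element of the first bad adjacent pair (objective: faster).

-- ===== PORT A =====
def pv_all_increasing (items : List Int) : Bool :=
  PySem.List.sorted items id false == items

-- items[::-1]: step -1 is never 0, so slice? always returns some
def pv_all_decreasing (items : List Int) : Bool :=
  PySem.List.sorted items id false == (PySem.List.slice? items none none (-1)).getD []

def pvValidGo (curr : Int) : List Int → Bool
  | [] => true
  | t :: ts => if |t - curr| < 1 || |t - curr| > 3 then false else pvValidGo t ts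

-- items[0] raises IndexError on []; that input is excluded by Pre_can_be_good
def pv_valid_steps (items : List Int) : Bool :=
  match items with
  | [] => false
  | c :: _ => pvValidGo c (PySem.List.slice items (some 1) none)

def pv_is_good (items : List Int) : Bool :=
  if !pv_valid_steps items then false
  else if !(pv_all_increasing items || pv_all_decreasing items) then false
  else true

-- the for-loop over range(len(items)) with copy.pop(i) and early return True
def pvLoopA (items : List Int) : List Int → Bool
  | [] => false
  | i :: is =>
    match PySem.List.pop? items i with
    | some r => if pv_is_good r.2 then true else pvLoopA items is
    | none => false

def can_be_good (items : List Int) : Bool :=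
  if pv_is_good items then true
  else pvLoopA items (PySem.List.pyRange 0 (items.length : Int) 1)

-- ===== PORT B =====
def pvStepOk (up : Bool) (a b : Int) : Bool :=
  let d := if up then b - a else a - b
  1 ≤ d && d ≤ 3

def pvOkFrom (up : Bool) (prev : Int) : List Int → Bool
  | [] => true
  | t :: ts => if pvStepOk up prev t then pvOkFrom up t ts else false

def pvDampGo (up : Bool) (pp : Option Int) (prev : Int) : List Int → Bool
  | [] => true
  | t :: tail =>
    if pvStepOk up prev t then pvDampGo up (some prev) t tail
    else
      (match pp with
       | some p => pvOkFrom up p (t :: tail)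
       | none => pvOkFrom up t tail) || pvOkFrom up prev tail

def pvDamp (items : List Int) (up : Bool) : Bool :=
  match items with
  | [] => true
  | x :: rest => pvDampGo up none x rest

def can_be_good_alt (items : List Int) : Bool :=
  pvDamp items true || pvDamp items false

-- ===== PRECONDITION & SPEC =====
-- A raises IndexError on the empty list (items[0] in valid_steps); Pre_ excludes exactly it.
def Pre_can_be_good (items : List Int) : Prop := items ≠ []
instance (items : List Int) : Decidable (Pre_can_be_good items) := by
  unfold Pre_can_be_good; infer_instance

def pvWitness_can_be_good : List Int := [1, 2, 9, 3]

def Spec_can_be_good (items : List Int) (out : Bool) : Prop := out = can_be_good_alt items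
instance (items : List Int) (out : Bool) : Decidable (Spec_can_be_good items out) := by
  unfold Spec_can_be_good; infer_instance

-- ===== CLAIM (what is proved, stated in full; the proofs are below) =====
def Claim_equal_can_be_good : Prop :=
  ∀ (items : List Int), Dom_can_be_good items → Pre_can_be_good items →
    Spec_can_be_good items (can_be_good items)

-- ===== LEMMAS AND PROOFS =====

-- Bool chain of adjacent pairs, the common yardstick for both ports
def pvChain (f : Int → Int → Bool) : List Int → Bool
  | [] => true
  | [_] => true
  | a :: b :: r => f a b && pvChain f (b :: r)

theorem pvChain_iff_chain' (f : Int → Int → Bool) (xs : List Int) :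
    pvChain f xs = true ↔ List.IsChain (fun a b => f a b = true) xs := by
  induction xs with
  | nil => simp [pvChain]
  | cons a r ih =>
    cases r with
    | nil => simp [pvChain]
    | cons b t => simp [pvChain, List.isChain_cons_cons, Bool.and_eq_true, ih]

theorem pvChain_congr {f g : Int → Int → Bool} (h : ∀ a b, f a b = g a b)
    (xs : List Int) : pvChain f xs = pvChain g xs := by
  induction xs with
  | nil => rfl
  | cons a r ih =>
    cases r with
    | nil => rfl
    | cons b t => simp only [pvChain, h] at ih ⊢; rw [ih]

theorem pvChain_and (f g : Int → Int → Bool) (xs : List Int) :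
    (pvChain f xs && pvChain g xs) = pvChain (fun a b => f a b && g a b) xs := by
  induction xs with
  | nil => rfl
  | cons a r ih =>
    cases r with
    | nil => rfl
    | cons b t =>
      simp only [pvChain] at ih ⊢
      rw [← ih]
      cases f a b <;> cases g a b <;> simp

theorem pvChain_append_cons (f : Int → Int → Bool) (l1 : List Int) (x : Int)
    (l2 : List Int) :
    pvChain f (l1 ++ x :: l2) = (pvChain f (l1 ++ [x]) && pvChain f (x :: l2)) := by
  induction l1 with
  | nil =>
    cases l2 with
    | nil => simp [pvChain]
    | cons b t => simp [pvChain]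
  | cons a r ih =>
    cases r with
    | nil => simp [pvChain]
    | cons b t => simp only [List.cons_append, pvChain] at ih ⊢; rw [ih, Bool.and_assoc]

theorem pvChain_snoc (f : Int → Int → Bool) (l : List Int) (x : Int) :
    pvChain f (l ++ [x]) =
      (pvChain f l && (match l.getLast? with | none => true | some p => f p x)) := by
  induction l with
  | nil => simp [pvChain]
  | cons a r ih =>
    cases r with
    | nil => simp [pvChain]
    | cons b t =>
      simp only [List.cons_append, pvChain] at ih ⊢
      rw [ih]
      simp [List.getLast?_cons_cons, Bool.and_assoc]

theorem pvOkFrom_eq_chain (up : Bool) (prev : Int) (l : List Int) :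
    pvOkFrom up prev l = pvChain (pvStepOk up) (prev :: l) := by
  induction l generalizing prev with
  | nil => rfl
  | cons t ts ih =>
    simp only [pvOkFrom, pvChain, ih]
    cases h : pvStepOk up prev t <;> simp

theorem pvValidGo_eq_chain (curr : Int) (l : List Int) :
    pvValidGo curr l =
      pvChain (fun a b => !(|b - a| < 1 || |b - a| > 3)) (curr :: l) := by
  induction l generalizing curr with
  | nil => rfl
  | cons t ts ih =>
    simp only [pvValidGo, pvChain, ih]
    cases h : (|t - curr| < 1 || |t - curr| > 3 : Bool) <;> simp_all

-- sorted(items) == items  ⟺  adjacent nondecreasing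
theorem pv_inc_eq_chain (xs : List Int) :
    pv_all_increasing xs = pvChain (fun a b => decide (a ≤ b)) xs := by
  have h : (PySem.List.sorted xs id false = xs) ↔
      List.IsChain (fun a b : Int => decide (a ≤ b) = true) xs := by
    constructor
    · intro h
      have := PySem.List.sorted_pairwise (xs := xs) (key := id)
      rw [h] at this
      rw [List.isChain_iff_pairwise]
      simpa using this
    · intro h
      apply PySem.List.sorted_eq_self_of_pairwise
      have := List.isChain_iff_pairwise.mp h
      simpa using this
  rw [pv_all_increasing, Bool.eq_iff_iff, beq_iff_eq, pvChain_iff_chain']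
  exact h

-- sorted(items) == items[::-1]  ⟺  adjacent nonincreasing
theorem pv_dec_eq_chain (xs : List Int) :
    pv_all_decreasing xs = pvChain (fun a b => decide (b ≤ a)) xs := by
  have h : (PySem.List.sorted xs id false = xs.reverse) ↔
      List.IsChain (fun a b : Int => decide (b ≤ a) = true) xs := by
    constructor
    · intro h
      have := PySem.List.sorted_pairwise (xs := xs) (key := id)
      rw [h] at this
      rw [List.isChain_iff_pairwise, ← List.pairwise_reverse]
      simpa using this
    · intro h
      have hrev : xs.reverse.Pairwise (fun a b : Int => a ≤ b) := by
        rw [List.pairwise_reverse]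
        have := List.isChain_iff_pairwise.mp h
        simpa using this
      have hperm : (PySem.List.sorted xs id false).Perm xs.reverse :=
        (PySem.List.sorted_perm xs id false).trans xs.reverse_perm.symm
      have hs : (PySem.List.sorted xs id false).Pairwise (fun a b : Int => a ≤ b) := by
        have := PySem.List.sorted_pairwise (xs := xs) (key := id)
        simpa using this
      exact List.Perm.eq_of_pairwise
        (fun a b _ _ h1 h2 => le_antisymm h1 h2) hs hrev hperm
  rw [pv_all_decreasing, PySem.List.slice?_none_none_neg_one, Bool.eq_iff_iff,
      Option.getD_some, beq_iff_eq, pvChain_iff_chain']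
  exact h

-- is_good on a nonempty list is "all steps +1..+3" or "all steps -1..-3"
theorem pv_is_good_eq_chain (x : Int) (r : List Int) :
    pv_is_good (x :: r) =
      (pvChain (pvStepOk true) (x :: r) || pvChain (pvStepOk false) (x :: r)) := by
  have hv : pv_valid_steps (x :: r) =
      pvChain (fun a b => !(|b - a| < 1 || |b - a| > 3)) (x :: r) := by
    rw [pv_valid_steps]
    rw [show PySem.List.slice (x :: r) (some 1) none = r by
      simpa using PySem.List.slice_from_one (xs := x :: r)]
    exact pvValidGo_eq_chain x r
  have hg : pv_is_good (x :: r) =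
      (pv_valid_steps (x :: r) && (pv_all_increasing (x :: r) || pv_all_decreasing (x :: r))) := by
    rw [pv_is_good]
    cases pv_valid_steps (x :: r) <;>
      cases pv_all_increasing (x :: r) <;> cases pv_all_decreasing (x :: r) <;> simp
  rw [hg, hv, pv_inc_eq_chain, pv_dec_eq_chain, Bool.and_or_distrib_left,
      pvChain_and, pvChain_and]
  congr 1
  · exact pvChain_congr (fun a b => by
      simp only [pvStepOk]
      by_cases h1 : (1 : Int) ≤ b - a <;> by_cases h2 : b - a ≤ 3 <;>
        simp [h1, h2, abs_lt, lt_abs] <;> omega) _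
  · exact pvChain_congr (fun a b => by
      simp only [pvStepOk]
      by_cases h1 : (1 : Int) ≤ a - b <;> by_cases h2 : a - b ≤ 3 <;>
        simp [h1, h2, abs_lt, lt_abs] <;> omega) _

-- A's loop is an `any` over the index list (all indices in range, so pop? succeeds)
theorem pvAny_congr {α : Type} (l : List α) (p q : α → Bool) (h : ∀ x ∈ l, p x = q x) :
    l.any p = l.any q := by
  induction l with
  | nil => rfl
  | cons a r ih =>
    simp only [List.any_cons, h a (by simp), ih (fun x hx => h x (by simp [hx]))]

theorem pvLoopA_eq_any (items : List Int) : ∀ (l : List Int),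
    (∀ i ∈ l, (PySem.List.pop? items i).isSome = true) →
    pvLoopA items l =
      l.any (fun i =>
        match PySem.List.pop? items i with
        | some r => pv_is_good r.2
        | none => false) := by
  intro l
  induction l with
  | nil => intro _; rfl
  | cons i is ih =>
    intro h
    have hi := h i (by simp)
    simp only [pvLoopA, List.any_cons]
    cases hp : PySem.List.pop? items i with
    | none => rw [hp] at hi; simp at hi
    | some r =>
      rw [ih (fun j hj => h j (by simp [hj]))]
      cases pv_is_good r.2 <;> simp

theorem pvLoopA_eq_range_any (items : List Int) :
    pvLoopA items (PySem.List.pyRange 0 (items.length : Int) 1) =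
      (List.range items.length).any (fun k => pv_is_good (items.eraseIdx k)) := by
  have hsome : ∀ i ∈ PySem.List.pyRange 0 (items.length : Int) 1,
      (PySem.List.pop? items i).isSome = true := by
    intro i hi
    rw [PySem.List.mem_pyRange_one] at hi
    have hk : i.toNat < items.length := by omega
    rw [show i = ((i.toNat : Nat) : Int) by omega, PySem.List.pop?_natCast items i.toNat hk]
    rfl
  rw [pvLoopA_eq_any items _ hsome, PySem.List.pyRange_one]
  have hlen : ((items.length : Int) - 0).toNat = items.length := by omega
  rw [hlen, List.any_map]
  apply pvAny_congr
  intro k hk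
  rw [List.mem_range] at hk
  simp only [Function.comp]
  rw [show ((0 : Int) + (k : Int)) = ((k : Nat) : Int) by simp,
      PySem.List.pop?_natCast items k hk]

-- the main invariant of B's dampened walk: with a good prefix `acc ++ [prev]` behind it
-- (pp = last of acc), the dampened walk decides "some single removal (or none) makes the
-- whole list a good chain"
theorem pvDampGo_spec (up : Bool) (rest : List Int) : ∀ (acc : List Int) (prev : Int),
    pvChain (pvStepOk up) (acc ++ [prev]) = true →
    pvDampGo up acc.getLast? prev rest =
      (pvChain (pvStepOk up) (acc ++ prev :: rest) ||
       (List.range (acc ++ prev :: rest).length).any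
         (fun i => pvChain (pvStepOk up) ((acc ++ prev :: rest).eraseIdx i))) := by
  induction rest with
  | nil =>
    intro acc prev h
    simp [pvDampGo, h]
  | cons t tail ih =>
    intro acc prev h
    cases hst : pvStepOk up prev t with
    | true =>
      have hacc' : pvChain (pvStepOk up) ((acc ++ [prev]) ++ [t]) = true := by
        have hc := pvChain_append_cons (pvStepOk up) acc prev [t]
        simp only [pvChain, hst, h, Bool.and_true] at hc
        simpa using hc
      have hih := ih (acc ++ [prev]) t hacc'
      rw [List.getLast?_concat] at hih
      simp only [pvDampGo, hst]
      simpa using hih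
    | false =>
      have hacc : pvChain (pvStepOk up) acc = true := by
        rw [pvChain_snoc, Bool.and_eq_true] at h
        exact h.1
      have h1 : pvChain (pvStepOk up) (acc ++ prev :: t :: tail) = false := by
        rw [pvChain_append_cons]
        simp [pvChain, hst]
      have hlen : (acc ++ prev :: t :: tail).length = acc.length + (2 + tail.length) := by
        simp; omega
      have hpart1 : (List.range acc.length).any
          (fun i => pvChain (pvStepOk up) ((acc ++ prev :: t :: tail).eraseIdx i)) = false := by
        rw [List.any_eq_false]
        intro i hi
        rw [List.mem_range] at hi
        rw [List.eraseIdx_append_of_lt_length hi, pvChain_append_cons]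
        simp [pvChain, hst]
      have he0 : (acc ++ prev :: t :: tail).eraseIdx (acc.length + 0) = acc ++ t :: tail := by
        rw [List.eraseIdx_append_of_length_le (by omega)]
        simp
      have he1 : (acc ++ prev :: t :: tail).eraseIdx (acc.length + 1) = acc ++ prev :: tail := by
        rw [List.eraseIdx_append_of_length_le (by omega)]
        simp [List.eraseIdx]
      have hpart4 : (List.range tail.length).any
          (fun j => pvChain (pvStepOk up)
            ((acc ++ prev :: t :: tail).eraseIdx (acc.length + (2 + j)))) = false := by
        rw [List.any_eq_false]
        intro j hj
        rw [List.eraseIdx_append_of_length_le (by omega),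
            show acc.length + (2 + j) - acc.length = j + 1 + 1 by omega]
        simp only [List.eraseIdx_cons_succ]
        rw [pvChain_append_cons]
        simp [pvChain, hst]
      have hv1 : pvChain (pvStepOk up) (acc ++ t :: tail) =
          (match acc.getLast? with
           | some p => pvOkFrom up p (t :: tail)
           | none => pvOkFrom up t tail) := by
        rw [pvChain_append_cons, pvChain_snoc, hacc, Bool.true_and]
        cases hL : acc.getLast? with
        | none => rw [pvOkFrom_eq_chain]; simp
        | some p => simp [pvOkFrom_eq_chain, pvChain]
      have hv2 : pvChain (pvStepOk up) (acc ++ prev :: tail) = pvOkFrom up prev tail := by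
        rw [pvChain_append_cons, h, Bool.true_and, pvOkFrom_eq_chain]
      simp only [pvDampGo, hst, Bool.false_eq_true, if_false]
      rw [h1, hlen, List.range_add, List.any_append, List.any_map, List.range_add,
          List.any_append, List.any_map]
      rw [show List.range 2 = [0, 1] by rfl]
      simp only [List.any_cons, List.any_nil, Function.comp_def]
      rw [hpart1, he0, he1, hv1, hv2]
      rw [hpart4]
      simp

theorem pvDamp_eq (up : Bool) (x : Int) (r : List Int) :
    pvDamp (x :: r) up =
      (pvChain (pvStepOk up) (x :: r) ||
       (List.range (x :: r).length).any
         (fun i => pvChain (pvStepOk up) ((x :: r).eraseIdx i))) := by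
  have := pvDampGo_spec up r [] x (by rfl)
  simpa [pvDamp] using this

-- Bool `any` distributes over `||`
theorem pvAny_or {α : Type} (l : List α) (p q : α → Bool) :
    (l.any fun x => p x || q x) = (l.any p || l.any q) := by
  induction l with
  | nil => rfl
  | cons a r ih =>
    simp only [List.any_cons, ih]
    cases p a <;> cases q a <;> simp

theorem can_be_good_eq_or (items : List Int) :
    can_be_good items =
      (pv_is_good items || pvLoopA items (PySem.List.pyRange 0 (items.length : Int) 1)) := by
  rw [can_be_good]
  cases pv_is_good items <;> simp

-- ===== VERDICT (by name: the statement is the Claim_ definition above) =====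
theorem can_be_good_spec : Claim_equal_can_be_good := by
  unfold Claim_equal_can_be_good
  intro items _ hpre
  unfold Spec_can_be_good
  cases items with
  | nil => exact absurd rfl hpre
  | cons x r =>
    cases r with
    | nil =>
      rw [can_be_good_eq_or, pv_is_good_eq_chain x []]
      simp [pvChain, can_be_good_alt, pvDamp, pvDampGo]
    | cons y r' =>
      rw [can_be_good_eq_or, pvLoopA_eq_range_any, pv_is_good_eq_chain x (y :: r')]
      have hpt : ∀ k ∈ List.range (x :: y :: r').length,
          pv_is_good ((x :: y :: r').eraseIdx k) =
            (pvChain (pvStepOk true) ((x :: y :: r').eraseIdx k) ||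
             pvChain (pvStepOk false) ((x :: y :: r').eraseIdx k)) := by
        intro k hk
        rw [List.mem_range] at hk
        cases he : (x :: y :: r').eraseIdx k with
        | nil =>
          have := List.length_eraseIdx (l := x :: y :: r') (i := k)
          rw [he] at this
          exfalso
          simp at this
          split at this <;> omega
        | cons z w => exact pv_is_good_eq_chain z w
      rw [pvAny_congr _ _ _ hpt, pvAny_or]
      rw [can_be_good_alt, pvDamp_eq true x (y :: r'), pvDamp_eq false x (y :: r')]
      cases pvChain (pvStepOk true) (x :: y :: r') <;>
        cases pvChain (pvStepOk false) (x :: y :: r') <;>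
          cases (List.range (x :: y :: r').length).any
            (fun i => pvChain (pvStepOk true) ((x :: y :: r').eraseIdx i)) <;>
            cases (List.range (x :: y :: r').length).any
              (fun i => pvChain (pvStepOk false) ((x :: y :: r').eraseIdx i)) <;>
              simp
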